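-- pv_equiv track=rewrite | github.com/Jasmineprogrammiert/DSA | C28_Grids_Matrices/P28.6.py | subgrid_max
-- ===== SOURCE A (Python) =====
-- def subgrid_max(grid):
--     R, C = len(grid), len(grid[0])
--     new_grid = [[0] * C for _ in range(R)]
--
--     for r in range(R):
--         for c in range(C):
--             max_cell = -float('inf')
--             for subgrid_r in range(r, R):
--                 for subgrid_c in range(c, C):
--                     if grid[subgrid_r][subgrid_c] > max_cell:
--                         max_cell = grid[subgrid_r][subgrid_c]
--             new_grid[r][c] = max_cell
--
--     return new_grid
-- ===== SOURCE B (Python) =====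
-- def subgrid_max(grid):
--     # Suffix-max DP: each cell is max(cell, right neighbor DP, below DP); O(R*C).
--     C = len(grid[0])
--     result = []
--     below = None
--     for row in reversed(grid):
--         cur = []
--         right = None
--         for c in range(C - 1, -1, -1):
--             v = row[c]
--             if right is not None:
--                 v = max(v, right)
--             if below is not None:
--                 v = max(v, below[c])
--             cur.append(v)
--             right = v
--         cur.reverse()
--         result.append(cur)
--         below = cur
--     result.reverse()
--     return result
-- ===== Notes on version B (the rewrite author's own statement) =====
-- stated objective: faster
-- what changed: Replaced the quadruple loop (a full scan of the lower-right subgrid for every cell) with a single reverse-order suffix-max dynamic program combining each cell with its right and below DP neighbors.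
import Mathlib
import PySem

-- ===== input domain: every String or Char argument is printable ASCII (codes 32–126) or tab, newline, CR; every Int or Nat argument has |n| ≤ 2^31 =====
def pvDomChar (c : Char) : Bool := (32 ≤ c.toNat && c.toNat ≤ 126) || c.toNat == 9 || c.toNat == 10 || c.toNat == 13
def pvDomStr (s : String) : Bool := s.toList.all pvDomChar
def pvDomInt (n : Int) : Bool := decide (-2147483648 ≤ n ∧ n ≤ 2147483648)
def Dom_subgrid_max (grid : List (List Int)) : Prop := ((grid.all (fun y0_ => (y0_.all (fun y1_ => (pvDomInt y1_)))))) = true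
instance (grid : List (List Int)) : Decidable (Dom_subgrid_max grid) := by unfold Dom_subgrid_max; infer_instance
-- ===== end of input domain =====

-- B replaces A's per-cell full scan of the lower-right subgrid (O(R^2*C^2)) with a
-- single reverse-order suffix-max dynamic program (O(R*C)); equivalence of return values.

-- ===== PORT A =====
-- A-side helper: the 'if grid[sr][sc] > max_cell: max_cell = grid[sr][sc]' update,
-- with 'none' playing -float('inf') (never returned: every scanned region is nonempty).
def pvStepA (acc : Option Int) (x : Int) : Option Int :=
  match acc with
  | none => some x
  | some m => if m < x then some x else some m

def subgrid_max (grid : List (List Int)) : List (List Int) :=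
  let R := PySem.List.len grid
  let C := PySem.List.len (PySem.List.pyGetD grid 0 [])
  (PySem.List.pyRange 0 R 1).map (fun r =>
    (PySem.List.pyRange 0 C 1).map (fun c =>
      ((PySem.List.pyRange r R 1).foldl (fun acc sr =>
        (PySem.List.pyRange c C 1).foldl (fun acc2 sc =>
          pvStepA acc2 (PySem.List.pyGetD (PySem.List.pyGetD grid sr []) sc 0)) acc) none).getD 0))

-- ===== PORT B =====
-- B-side helper: one row of the DP, right to left: v = max(row[c], right, below[c]);
-- 'below = none' is B's first (bottom) iteration, recursion tails row and below together.
def pvRowDP : List Int → Option (List Int) → List Int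
  | [], _ => []
  | x :: xs, below =>
    let rest := pvRowDP xs (below.map List.tail)
    let v := x
    let v := match rest with
             | [] => v
             | r :: _ => max v r
    let v := match below with
             | none => v
             | some [] => v
             | some (bv :: _) => max v bv
    v :: rest

-- B-side helper: bottom-up over the rows ('for row in reversed(grid)'), accumulating
-- the result back-to-front; 'below' is the head of the already-built result.
def pvGo : List (List Int) → List (List Int)
  | [] => []
  | row :: rest =>
    let below := pvGo rest
    pvRowDP row below.head? :: below

def subgrid_max_alt (grid : List (List Int)) : List (List Int) :=
  let C := (PySem.List.pyGetD grid 0 []).length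
  pvGo (grid.map (fun row => row.take C))

-- ===== PRECONDITION & SPEC =====
-- Pre_ excludes exactly the inputs where A raises IndexError: the empty grid
-- (grid[0] fails) and grids with a row shorter than the first row (grid[sr][sc] fails).
def Pre_subgrid_max (grid : List (List Int)) : Prop :=
  grid ≠ [] ∧ ∀ row ∈ grid, (grid.headD []).length ≤ row.length
instance (grid : List (List Int)) : Decidable (Pre_subgrid_max grid) := by
  unfold Pre_subgrid_max; infer_instance
def pvWitness_subgrid_max : List (List Int) := [[1, 2], [3, 4]]
def Spec_subgrid_max (grid : List (List Int)) (out : List (List Int)) : Prop := out = subgrid_max_alt grid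
instance (grid : List (List Int)) (out : List (List Int)) : Decidable (Spec_subgrid_max grid out) := by unfold Spec_subgrid_max; infer_instance

-- ===== CLAIM (what is proved, stated in full; the proofs are below) =====
def Claim_equal_subgrid_max : Prop := ∀ (grid : List (List Int)), Dom_subgrid_max grid → Pre_subgrid_max grid → Spec_subgrid_max grid (subgrid_max grid)

-- ===== LEMMAS AND PROOFS =====

-- proof-side closed form: maximum (0 on empty) of all cells in rows ≥ the current one,
-- columns ≥ c, of a rectangular grid
def pvMx (l : List Int) : Int := (PySem.List.max? l (fun y => y)).getD 0
def pvCells (G : List (List Int)) (c : Nat) : List Int := (G.map (fun row => row.drop c)).flatten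
def pvAgen (G : List (List Int)) (C : Nat) : List (List Int) :=
  (List.range G.length).map (fun r => (List.range C).map (fun c => pvMx (pvCells (G.drop r) c)))

theorem pvFoldl_max_shift (ys : List Int) : ∀ (x a : Int), ys.foldl max (max x a) = max x (ys.foldl max a) := by
  induction ys with
  | nil => intro x a; rfl
  | cons z ys ih =>
    intro x a
    show ys.foldl max (max (max x a) z) = max x (ys.foldl max (max a z))
    rw [max_assoc, ih]

theorem pvMx_singleton (x : Int) : pvMx [x] = x := by
  simp [pvMx, PySem.List.max?_id_cons]

theorem pvMx_cons_ne (x : Int) (K : List Int) (h : K ≠ []) : pvMx (x :: K) = max x (pvMx K) := by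
  match K with
  | k :: ks =>
    simp only [pvMx, PySem.List.max?_id_cons, Option.getD_some]
    show (k :: ks).foldl max x = _
    simp only [List.foldl_cons]
    exact pvFoldl_max_shift ks x k

theorem pvMx_append (A B : List Int) (hA : A ≠ []) (hB : B ≠ []) : pvMx (A ++ B) = max (pvMx A) (pvMx B) := by
  induction A with
  | nil => exact absurd rfl hA
  | cons a as ih =>
    match as with
    | [] => simp only [List.singleton_append, pvMx_singleton]; exact pvMx_cons_ne a B hB
    | a2 :: as2 =>
      have h1 : (a2 :: as2) ++ B ≠ [] := by simp
      rw [List.cons_append, pvMx_cons_ne a _ h1, ih (by simp),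
          pvMx_cons_ne a (a2 :: as2) (by simp), max_assoc]

theorem pvMx_le_subset (K L : List Int) (hK : K ≠ []) (hsub : ∀ a ∈ K, a ∈ L) : pvMx K ≤ pvMx L := by
  match K with
  | k :: ks =>
    obtain ⟨m, hm⟩ : ∃ m, PySem.List.max? (k :: ks) (fun y => y) = some m :=
      ⟨_, PySem.List.max?_id_cons k ks⟩
    have hmem : m ∈ k :: ks := PySem.List.max?_mem hm
    have hmL : m ∈ L := hsub m hmem
    have hLne : L ≠ [] := fun h => by subst h; exact absurd hmL (List.not_mem_nil)
    match hL : PySem.List.max? L (fun y => y) with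
    | none => exact absurd ((PySem.List.max?_eq_none_iff L (fun y => y)).mp hL) hLne
    | some mL =>
      have := PySem.List.max?_isMax hL m hmL
      simp only [pvMx, hm, hL, Option.getD_some]
      exact this

theorem pvCells_ne (G : List (List Int)) (c : Nat) (hG : G ≠ []) (h : ∀ r' ∈ G, c < r'.length) :
    pvCells G c ≠ [] := by
  match G with
  | g :: gs =>
    have hg : g.drop c ≠ [] := by
      have := h g (by simp)
      simp [List.drop_eq_nil_iff]; omega
    simp only [pvCells, List.map_cons, List.flatten_cons]
    intro hcon
    exact hg (List.append_eq_nil_iff.mp hcon).1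

theorem pvCells_mono_mem (G : List (List Int)) (c : Nat) (a : Int) (ha : a ∈ pvCells G (c + 1)) :
    a ∈ pvCells G c := by
  simp only [pvCells, List.mem_flatten, List.mem_map] at ha ⊢
  obtain ⟨l, ⟨row, hrow, rfl⟩, hal⟩ := ha
  refine ⟨row.drop c, ⟨row, hrow, rfl⟩, ?_⟩
  have : row.drop (c + 1) = (row.drop c).drop 1 := by rw [List.drop_drop]
  rw [this] at hal
  exact List.drop_subset _ _ hal

theorem pvStepA_some (l : List Int) : ∀ (m : Int), l.foldl pvStepA (some m) = some (l.foldl max m) := by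
  induction l with
  | nil => intro m; rfl
  | cons x xs ih =>
    intro m
    have hstep : pvStepA (some m) x = some (max m x) := by
      simp only [pvStepA]
      rcases le_or_gt x m with h | h
      · rw [if_neg (by omega), max_eq_left h]
      · rw [if_pos h, max_eq_right h.le]
    simp only [List.foldl_cons, hstep, ih]

theorem pvStepA_none_mx (l : List Int) : (l.foldl pvStepA none).getD 0 = pvMx l := by
  match l with
  | [] => rfl
  | x :: xs =>
    show ((xs.foldl pvStepA (pvStepA none x)).getD 0) = _
    rw [show pvStepA none x = some x from rfl, pvStepA_some]
    simp [pvMx, PySem.List.max?_id_cons]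

theorem pvFoldRange {α β : Type} (f : β → α → β) (d : α) :
    ∀ (k c : Nat) (row : List α) (acc : β), c + k ≤ row.length →
      (PySem.List.pyRange (c : Int) ((c + k : Nat) : Int) 1).foldl
          (fun a j => f a (PySem.List.pyGetD row j d)) acc
        = ((row.take (c + k)).drop c).foldl f acc := by
  intro k
  induction k with
  | zero =>
    intro c row acc hlen
    rw [Nat.add_zero, PySem.List.pyRange_one_eq_nil (le_refl _)]
    have hnil : (row.take c).drop c = [] :=
      List.drop_eq_nil_of_le (by simp)
    rw [hnil]
    rfl
  | succ k ih =>
    intro c row acc hlen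
    have hlt : (c : Int) < ((c + (k + 1) : Nat) : Int) := by push_cast; omega
    rw [PySem.List.pyRange_one_cons hlt]
    simp only [List.foldl_cons]
    have hc1 : (c : Int) + 1 = ((c + 1 : Nat) : Int) := by push_cast; ring
    have harg : ((c + (k + 1) : Nat) : Int) = (((c + 1) + k : Nat) : Int) := by push_cast; ring
    rw [hc1, harg, ih (c + 1) row _ (by omega)]
    have hcl : c < row.length := by omega
    have hget : PySem.List.pyGetD row (c : Int) d = row[c] := by
      rw [PySem.List.pyGetD_natCast, List.getD_eq_getElem row d hcl]
    have htk : (c + 1) + k = c + (k + 1) := by omega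
    rw [htk]
    have hclen : c < (row.take (c + (k + 1))).length := by
      simp [List.length_take]; omega
    rw [List.drop_eq_getElem_cons hclen, List.foldl_cons, List.getElem_take, hget]

theorem pvAgen_cons (row : List Int) (rest : List (List Int)) (C : Nat) :
    pvAgen (row :: rest) C
      = ((List.range C).map (fun c => pvMx (pvCells (row :: rest) c))) :: pvAgen rest C := by
  simp [pvAgen, List.range_succ_eq_map, List.map_map, Function.comp_def]

theorem pvMapRange_cons (g : Nat → List Int → List Int) (z : Int) (zs : List Int) :
    (List.range (z :: zs).length).map (fun c => pvMx (g c (z :: zs)))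
      = pvMx (g 0 (z :: zs)) :: (List.range zs.length).map (fun c => pvMx (g (c + 1) (z :: zs))) := by
  rw [List.length_cons, List.range_succ_eq_map]
  simp [Function.comp_def]

theorem pvRowDP_none (row : List Int) :
    pvRowDP row none = (List.range row.length).map (fun c => pvMx (row.drop c)) := by
  induction row with
  | nil => rfl
  | cons x xs ih =>
    simp only [pvRowDP, Option.map_none, ih]
    match xs with
    | [] => simp [pvMx_singleton]
    | y :: ys =>
      have hne : (y :: ys : List Int) ≠ [] := by simp
      rw [pvMapRange_cons (fun c l => l.drop c) x (y :: ys)]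
      simp only [List.drop_zero, List.drop_succ_cons]
      rw [pvMx_cons_ne x (y :: ys) hne,
        pvMapRange_cons (fun c l => l.drop c) y ys]
      simp [List.drop_succ_cons]

theorem pvRowDP_cells : ∀ (row : List Int) (c0 : Nat) (G : List (List Int)), G ≠ [] →
    (∀ r' ∈ G, r'.length = c0 + row.length) →
    pvRowDP row (some ((List.range row.length).map (fun c => pvMx (pvCells G (c0 + c)))))
      = (List.range row.length).map (fun c => pvMx (row.drop c ++ pvCells G (c0 + c))) := by
  intro row
  induction row with
  | nil => intro c0 G hG hlen; rfl
  | cons x xs ih =>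
    intro c0 G hG hlen
    have hshift : ∀ (L : List Int → Nat → List Int),
        (List.range xs.length).map (fun c => pvMx (L (pvCells G (c0 + (c + 1))) c))
          = (List.range xs.length).map (fun c => pvMx (L (pvCells G ((c0 + 1) + c)) c)) := by
      intro L
      apply List.map_congr_left
      intro a _
      have : c0 + (a + 1) = (c0 + 1) + a := by omega
      rw [this]
    have hlen' : ∀ r' ∈ G, r'.length = (c0 + 1) + xs.length := by
      intro r' hr'
      rw [hlen r' hr']
      simp [List.length_cons]; omega
    rw [pvMapRange_cons (fun c _ => pvCells G (c0 + c)) x xs,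
        pvMapRange_cons (fun c l => l.drop c ++ pvCells G (c0 + c)) x xs]
    simp only [pvRowDP, Option.map_some, List.tail_cons, List.drop_zero, List.drop_succ_cons,
      Nat.add_zero]
    rw [hshift (fun K c => K), hshift (fun K c => xs.drop c ++ K), ih (c0 + 1) G hG hlen']
    have hK0 : pvCells G c0 ≠ [] := by
      apply pvCells_ne G c0 hG
      intro r' hr'
      rw [hlen r' hr']
      simp [List.length_cons]
    match xs with
    | [] =>
      simp only [List.length_nil, List.range_zero, List.map_nil, List.singleton_append]
      rw [pvMx_cons_ne x (pvCells G c0) hK0]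
    | y :: ys =>
      have hK1 : pvCells G (c0 + 1) ≠ [] := by
        apply pvCells_ne G (c0 + 1) hG
        intro r' hr'
        rw [hlen r' hr']
        simp [List.length_cons]
      have h01 : pvMx (pvCells G (c0 + 1)) ≤ pvMx (pvCells G c0) :=
        pvMx_le_subset _ _ hK1 (fun a ha => pvCells_mono_mem G c0 a ha)
      rw [pvMapRange_cons (fun c l => l.drop c ++ pvCells G ((c0 + 1) + c)) y ys]
      simp only [List.drop_zero, Nat.add_zero]
      congr 1
      show max (max x (pvMx ((y :: ys) ++ pvCells G (c0 + 1)))) (pvMx (pvCells G c0))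
        = pvMx (x :: ((y :: ys) ++ pvCells G c0))
      rw [pvMx_append (y :: ys) (pvCells G (c0 + 1)) (by simp) hK1,
          pvMx_cons_ne x ((y :: ys) ++ pvCells G c0) (by simp),
          pvMx_append (y :: ys) (pvCells G c0) (by simp) hK0,
          max_assoc x, max_assoc (pvMx (y :: ys)), max_eq_right h01]

theorem pvGo_eq : ∀ (G : List (List Int)) (C : Nat), (∀ row ∈ G, row.length = C) →
    pvGo G = pvAgen G C := by
  intro G
  induction G with
  | nil => intro C _; rfl
  | cons row rest ih =>
    intro C h
    have hrow : row.length = C := h row (by simp)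
    have hrest : ∀ r ∈ rest, r.length = C := fun r hr => h r (by simp [hr])
    rw [pvAgen_cons]
    show pvRowDP row (pvGo rest).head? :: pvGo rest = _
    rw [ih C hrest]
    congr 1
    · match rest with
      | [] =>
        show pvRowDP row none = _
        rw [pvRowDP_none, ← hrow]
        apply List.map_congr_left
        intro c _
        congr 1
        simp [pvCells]
      | r0 :: rs =>
        rw [pvAgen_cons]
        show pvRowDP row (some ((List.range C).map fun c => pvMx (pvCells (r0 :: rs) c))) = _
        have hz : ∀ (F : Nat → List Int), (List.range C).map (fun c => pvMx (F c))
            = (List.range row.length).map (fun c => pvMx (F (0 + c))) := by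
          intro F
          rw [hrow]
          apply List.map_congr_left
          intro c _
          rw [Nat.zero_add]
        rw [hz (fun c => pvCells (r0 :: rs) c)]
        rw [pvRowDP_cells row 0 (r0 :: rs) (by simp)
          (fun r' hr' => by rw [hrest r' hr', hrow]; omega)]
        rw [hz (fun c => pvCells ((row :: r0 :: rs)) c)]
        apply List.map_congr_left
        intro c _
        congr 1
        simp [pvCells]

theorem pvFoldl_rows (h : List Int → List Int) (G : List (List Int)) : ∀ (acc : Option Int),
    G.foldl (fun a row' => (h row').foldl pvStepA a) acc
      = ((G.map h).flatten).foldl pvStepA acc := by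
  induction G with
  | nil => intro acc; rfl
  | cons g gs ih =>
    intro acc
    simp only [List.foldl_cons, List.map_cons, List.flatten_cons, List.foldl_append, ih]

theorem pvA_eq (g0 : List Int) (gs : List (List Int))
    (h : ∀ row ∈ (g0 :: gs), g0.length ≤ row.length) :
    subgrid_max (g0 :: gs) = pvAgen ((g0 :: gs).map (fun row => row.take g0.length)) g0.length := by
  simp only [subgrid_max, PySem.List.len_eq, PySem.List.pyGetD_zero_cons,
    PySem.List.pyRange_zero_natCast, List.map_map]
  simp only [pvAgen, List.length_map]
  apply List.map_congr_left
  intro r hr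
  rw [List.mem_range] at hr
  simp only [Function.comp_def]
  apply List.map_congr_left
  intro c hc
  rw [List.mem_range] at hc
  have hL : (((g0 :: gs).length : Nat) : Int) = ((r + ((g0 :: gs).length - r) : Nat) : Int) := by
    rw [Nat.add_sub_cancel' (le_of_lt hr)]
  rw [hL,
    pvFoldRange (fun a row' =>
        (PySem.List.pyRange (c : Int) ((g0.length : Nat) : Int) 1).foldl
          (fun acc2 sc => pvStepA acc2 (PySem.List.pyGetD row' sc 0)) a)
      [] ((g0 :: gs).length - r) r (g0 :: gs) none (by omega),
    Nat.add_sub_cancel' (le_of_lt hr), List.take_length]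
  have hinner : ((g0 :: gs).drop r).foldl (fun a row' =>
        (PySem.List.pyRange (c : Int) ((g0.length : Nat) : Int) 1).foldl
          (fun acc2 sc => pvStepA acc2 (PySem.List.pyGetD row' sc 0)) a) none
      = ((g0 :: gs).drop r).foldl (fun a row' => ((row'.take g0.length).drop c).foldl pvStepA a) none := by
    apply PySem.List.foldl_congr_mem'
    intro row' hrow' acc
    have hCle : g0.length ≤ row'.length := h row' (List.mem_of_mem_drop hrow')
    have hC : (((g0.length : Nat)) : Int) = ((c + (g0.length - c) : Nat) : Int) := by
      rw [Nat.add_sub_cancel' (le_of_lt hc)]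
    rw [hC, pvFoldRange pvStepA 0 (g0.length - c) c row' acc (by omega),
      Nat.add_sub_cancel' (le_of_lt hc)]
  rw [hinner, pvFoldl_rows (fun row' => (row'.take g0.length).drop c) ((g0 :: gs).drop r) none,
    pvStepA_none_mx]
  congr 1
  simp only [pvCells, List.map_cons]
  congr 1
  rw [← List.map_cons, ← List.map_drop, List.map_map]
  simp [Function.comp_def]

-- ===== VERDICT (by name: the statement is the Claim_ definition above) =====
theorem subgrid_max_spec : Claim_equal_subgrid_max := by
  intro grid _ hpre
  obtain ⟨hne, hlen⟩ := hpre
  match grid with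
  | [] => exact absurd rfl hne
  | g0 :: gs =>
    show subgrid_max (g0 :: gs) = subgrid_max_alt (g0 :: gs)
    have hlen' : ∀ row ∈ (g0 :: gs), g0.length ≤ row.length := by
      simpa using hlen
    rw [pvA_eq g0 gs hlen']
    show _ = pvGo ((g0 :: gs).map (fun row => row.take (PySem.List.pyGetD (g0 :: gs) 0 []).length))
    rw [PySem.List.pyGetD_zero_cons]
    rw [pvGo_eq ((g0 :: gs).map (fun row => row.take g0.length)) g0.length]
    intro row hrow
    simp only [List.mem_map] at hrow
    obtain ⟨r, hr, rfl⟩ := hrow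
    simp [List.length_take]
    exact hlen' r hr
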